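-- pv_equiv track=rewrite | github.com/taik792/lotto-automatico | analisi_ambi.py | calcola_ciclo_reale
-- ===== SOURCE A (Python) =====
-- def calcola_ciclo_reale(numero, estrazioni):
--     posizioni = []
--
--     for i, estr in enumerate(estrazioni):
--         if numero in estr:
--             posizioni.append(i)
--
--     # se esce troppo poco → ciclo 0
--     if len(posizioni) < 2:
--         return 0
--
--     # distanza tra uscite
--     distanze = []
--     for i in range(1, len(posizioni)):
--         distanze.append(posizioni[i] - posizioni[i - 1])
--
--     # media
--     return int(sum(distanze) / len(distanze))
-- ===== SOURCE B (Python) =====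
-- def calcola_ciclo_reale(numero, estrazioni):
--     first = last = None
--     count = 0
--     for i, estr in enumerate(estrazioni):
--         if numero in estr:
--             if first is None:
--                 first = i
--             last = i
--             count += 1
--     if count < 2:
--         return 0
--     return int((last - first) / (count - 1))
-- ===== Notes on version B (the rewrite author's own statement) =====
-- stated objective: simpler
-- what changed: single pass keeping first index, last index and count instead of building a positions list and a gaps list; the telescoping closed form (last-first)/(count-1) replaces summing consecutive differences
import Mathlib
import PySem

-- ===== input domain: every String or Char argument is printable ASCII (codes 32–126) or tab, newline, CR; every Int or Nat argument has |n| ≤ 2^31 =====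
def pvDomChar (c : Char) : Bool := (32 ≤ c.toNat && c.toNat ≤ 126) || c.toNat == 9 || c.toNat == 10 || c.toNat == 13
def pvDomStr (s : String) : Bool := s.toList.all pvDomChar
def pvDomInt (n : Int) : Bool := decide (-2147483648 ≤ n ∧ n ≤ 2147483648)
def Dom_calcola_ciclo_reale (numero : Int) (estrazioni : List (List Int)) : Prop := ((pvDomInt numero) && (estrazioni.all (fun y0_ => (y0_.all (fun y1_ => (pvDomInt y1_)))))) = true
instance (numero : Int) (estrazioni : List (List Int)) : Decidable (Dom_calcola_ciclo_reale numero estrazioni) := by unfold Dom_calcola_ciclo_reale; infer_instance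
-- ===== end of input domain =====

-- B does one pass keeping only first index, last index and a count, and uses
-- the closed form (last-first)/(count-1) for the average gap; O(1) extra space.

-- ===== PORT A =====
-- int(sum/len): sum and len are both nonnegative here (indices are increasing),
-- so Python's truncating int(float division) equals floor division exactly.
def calcola_ciclo_reale (numero : Int) (estrazioni : List (List Int)) : Int :=
  let posizioni : List Int :=
    (PySem.List.enumerate estrazioni).foldl
      (fun acc p => if numero ∈ p.2 then acc ++ [p.1] else acc) []
  if posizioni.length < 2 then 0
  else
    -- posizioni[i] is always in range here; pyGetD with default 0 is exact
    let distanze : List Int :=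
      (PySem.List.pyRange 1 posizioni.length 1).foldl
        (fun acc i => acc ++ [PySem.List.pyGetD posizioni i 0 - PySem.List.pyGetD posizioni (i - 1) 0]) []
    PySem.Int.floordiv distanze.sum distanze.length

-- ===== PORT B =====
-- state: (first : Option Int, last : Int, count : Int); last/count start at 0
def calcola_ciclo_reale_alt (numero : Int) (estrazioni : List (List Int)) : Int :=
  let s : Option Int × Int × Int :=
    (PySem.List.enumerate estrazioni).foldl
      (fun st p =>
        if numero ∈ p.2 then
          ((match st.1 with | none => some p.1 | some f => some f), p.1, st.2.2 + 1)
        else st)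
      (none, 0, 0)
  match s with
  | (none, _, _) => 0
  | (some f, last, count) =>
      if count < 2 then 0
      -- int((last-first)/(count-1)): both parts nonnegative, = floor division
      else PySem.Int.floordiv (last - f) (count - 1)

-- ===== PRECONDITION & SPEC =====
def Spec_calcola_ciclo_reale (numero : Int) (estrazioni : List (List Int)) (out : Int) : Prop := out = calcola_ciclo_reale_alt numero estrazioni
instance (numero : Int) (estrazioni : List (List Int)) (out : Int) : Decidable (Spec_calcola_ciclo_reale numero estrazioni out) := by unfold Spec_calcola_ciclo_reale; infer_instance

-- ===== CLAIM (what is proved, stated in full; the proofs are below) =====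
def Claim_equal_calcola_ciclo_reale : Prop := ∀ (numero : Int) (estrazioni : List (List Int)), Dom_calcola_ciclo_reale numero estrazioni → Spec_calcola_ciclo_reale numero estrazioni (calcola_ciclo_reale numero estrazioni)

-- ===== LEMMAS AND PROOFS =====

-- A's first loop: the positions list is a filter-then-project of the enumerate list
theorem posA_eq (numero : Int) (L : List (Int × List Int)) (acc : List Int) :
    L.foldl (fun acc p => if numero ∈ p.2 then acc ++ [p.1] else acc) acc
      = acc ++ (L.filter (fun p => numero ∈ p.2)).map (·.1) := by
  induction L generalizing acc with
  | nil => simp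
  | cons x xs ih =>
      simp only [List.foldl_cons, List.filter_cons]
      by_cases h : numero ∈ x.2 <;> simp [h, ih]

-- B's loop computes (head?, getLastD 0, length) of the same filtered list
theorem stB_eq (numero : Int) (L : List (Int × List Int)) (q : List Int) :
    L.foldl
      (fun (st : Option Int × Int × Int) p =>
        if numero ∈ p.2 then
          ((match st.1 with | none => some p.1 | some f => some f), p.1, st.2.2 + 1)
        else st)
      (q.head?, q.getLastD 0, (q.length : Int))
      = ((q ++ (L.filter (fun p => numero ∈ p.2)).map (·.1)).head?,
         (q ++ (L.filter (fun p => numero ∈ p.2)).map (·.1)).getLastD 0,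
         ((q ++ (L.filter (fun p => numero ∈ p.2)).map (·.1)).length : Int)) := by
  induction L generalizing q with
  | nil => simp
  | cons x xs ih =>
      simp only [List.foldl_cons, List.filter_cons]
      by_cases h : numero ∈ x.2
      · have step :
          ((match q.head? with | none => some x.1 | some f => some f), x.1, ((q.length : Int) + 1))
            = ((q ++ [x.1]).head?, (q ++ [x.1]).getLastD 0, ((q ++ [x.1]).length : Int)) := by
          cases q with
          | nil => simp
          | cons a t =>
              simp only [Prod.mk.injEq, List.cons_append, List.head?_cons,
                List.length_cons, List.length_append]
              refine ⟨trivial, ?_, by push_cast [List.length_nil, List.length_cons]; omega⟩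
              rw [List.getLastD_eq_getLast?, ← List.cons_append, List.getLast?_concat]
              rfl
        simp only [h, if_true, decide_true, List.map_cons]
        rw [step, ih (q ++ [x.1])]
        simp
      · simp only [h, if_false, decide_false]
        exact ih q

-- telescoping: sum of consecutive differences over a range
theorem telescope (g : Int → Int) : ∀ (n : Nat) (a b : Int), a ≤ b → (b - a).toNat = n →
    ((PySem.List.pyRange a b 1).map (fun i => g i - g (i - 1))).sum = g (b - 1) - g (a - 1) := by
  intro n
  induction n with
  | zero =>
      intro a b hab hn
      have : b = a := by omega
      subst this
      simp [PySem.List.pyRange_one_eq_nil le_rfl]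
  | succ m ih =>
      intro a b hab hn
      have h1 : a ≤ b - 1 := by omega
      have hsplit : PySem.List.pyRange a b 1 = PySem.List.pyRange a (b - 1) 1 ++ [b - 1] := by
        have := PySem.List.pyRange_one_succ_right (a := a) (b := b - 1) h1
        simpa using this
      rw [hsplit, List.map_append, List.sum_append, ih a (b - 1) h1 (by omega)]
      simp only [List.map_cons, List.map_nil, List.sum_cons, List.sum_nil]
      ring

-- the second loop of A builds the list of consecutive differences
theorem distA_map (ps : List Int) :
    (PySem.List.pyRange 1 ps.length 1).foldl
        (fun acc i => acc ++ [PySem.List.pyGetD ps i 0 - PySem.List.pyGetD ps (i - 1) 0]) []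
      = (PySem.List.pyRange 1 ps.length 1).map
          (fun i => PySem.List.pyGetD ps i 0 - PySem.List.pyGetD ps (i - 1) 0) := by
  simpa using PySem.List.foldl_append_singleton_eq_map
    (l := PySem.List.pyRange 1 ps.length 1)
    (f := fun i => PySem.List.pyGetD ps i 0 - PySem.List.pyGetD ps (i - 1) 0) (acc := [])

-- last element of a nonempty list via its last index
theorem getD_last (ps : List Int) (h : ps ≠ []) (d : Int) :
    PySem.List.pyGetD ps ((ps.length : Int) - 1) 0 = ps.getLastD d := by
  have hlen : 1 ≤ ps.length := List.length_pos_iff.mpr h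
  have hcast : ((ps.length : Int) - 1) = ((ps.length - 1 : Nat) : Int) := by omega
  rw [hcast, PySem.List.pyGetD_natCast, List.getD_eq_getElem _ _ (by omega)]
  simp [List.getLastD_eq_getLast?, List.getLast?_eq_some_getLast h, List.getLast_eq_getElem]

-- ===== VERDICT (by name: the statement is the Claim_ definition above) =====
theorem calcola_ciclo_reale_spec : Claim_equal_calcola_ciclo_reale := by
  intro numero estrazioni _
  unfold Spec_calcola_ciclo_reale calcola_ciclo_reale calcola_ciclo_reale_alt
  rw [posA_eq]
  rw [show ((none, 0, 0) : Option Int × Int × Int)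
        = (([] : List Int).head?, ([] : List Int).getLastD 0, ((([] : List Int).length) : Int)) from rfl,
      stB_eq]
  simp only [List.nil_append]
  generalize ((PySem.List.enumerate estrazioni).filter (fun p => numero ∈ p.2)).map (·.1) = ps
  match ps with
  | [] => simp
  | [p] => simp
  | p :: p' :: rest =>
      set ps' := p :: p' :: rest with hps'
      have hne : ps' ≠ [] := by simp [hps']
      have hlen2 : 2 ≤ ps'.length := by simp [hps']
      have hA : ¬ (ps'.length < 2) := by omega
      simp only [hA, if_false]
      have hhead : ps'.head? = some p := rfl
      have hB : ¬ ((ps'.length : Int) < 2) := by omega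
      rw [distA_map, telescope (fun i => PySem.List.pyGetD ps' i 0) (ps'.length - 1) 1 ps'.length
            (by omega) (by omega)]
      simp only [hhead]
      have hlenD : (((PySem.List.pyRange 1 ps'.length 1).map
          (fun i => PySem.List.pyGetD ps' i 0 - PySem.List.pyGetD ps' (i - 1) 0)).length : Int)
            = (ps'.length : Int) - 1 := by
        simp [PySem.List.length_pyRange_one]
        omega
      rw [hlenD, getD_last ps' hne 0]
      have hg0 : PySem.List.pyGetD ps' ((1 : Int) - 1) 0 = p := by
        norm_num
        rw [hps', PySem.List.pyGetD_zero_cons]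
      rw [hg0]
      simp [hB]
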